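-- pv_equiv track=rewrite | github.com/Dufren-Gong/id_card_mlsd_paddle-ocr_edit | my_utils/operate_word.py | number_to_chinese
-- ===== SOURCE A (Python) =====
-- def number_to_chinese(s):
--     s_duizhao = {
--         '0':"零",'1':"壹",'2':"贰",'3':"叁",'4':"肆",
--         '5':"伍",'6':"陆",'7':"柒",'8':"捌",'9':"玖"
--     }
--     #小数点前最大到千亿 可继续增加
--     if len(s) == 1:
--         return s_duizhao[s] + '元'
--     else:
--         s_danwei = {
--             0:'',1:'拾',2:'佰',3:'仟',4:'万',8:'亿'
--         }
--         re_re = ""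
--         if '.' in s :
--             s_1 = s[0:s.find('.')]
--             s_2 = s[s.find('.')+1:]
--             flag_1 = 0
--             s_1 = s_1[::-1]
--
--             for i in s_1:
--                 if flag_1 != 0 and flag_1 % 4 == 0:
--                     re_re += s_danwei[flag_1]
--                 if i != '0':
--                     re_re += s_danwei[flag_1 % 4]
--                 re_re += s_duizhao[i]
--                 flag_1 += 1
--             re_re = re_re[::-1]
--             while re_re.endswith('零') and len(re_re)>1:
--                 re_re = re_re[:-1]
--             # 中文数字没有连续的零
--             while "零零" in re_re:
--                 re_re = re_re.replace("零零", "零")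
--             re_re += '点'
--             for i in s_2:
--                 re_re += s_duizhao[i]
--         else:
--             s_1 = s
--             s_1 = s_1[::-1]
--             flag_1 = 0
--
--             for i in s_1:
--                 if flag_1 != 0 and flag_1 % 4 == 0:
--                     re_re += s_danwei[flag_1]
--                 if i != '0':
--                     re_re += s_danwei[flag_1 % 4]
--                 re_re += s_duizhao[i]
--                 flag_1 += 1
--             re_re = re_re[::-1]
--             while re_re.endswith('零') and len(re_re)>1:
--                 re_re = re_re[:-1]
--             # 中文数字没有连续的零
--             while "零零" in re_re:
--                 re_re = re_re.replace("零零", "零")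
--
--         if re_re[1] == '十' and re_re[0] == '一':
--             re_re = re_re[1:]
--     return re_re + '元'
-- ===== SOURCE B (Python) =====
-- def number_to_chinese(s):
--     digit_words = "零壹贰叁肆伍陆柒捌玖"
--     small_units = ('', '拾', '佰', '仟')
--     big_units = {4: '万', 8: '亿'}
--
--     def digit(c):
--         return digit_words[int(c)]
--
--     def integer_part(part):
--         # left-to-right: digit word, then small unit, then big unit at the 万/亿 break
--         f = len(part)
--         pieces = []
--         for ch in part:
--             f -= 1
--             pieces.append(digit(ch))
--             if ch != '0':
--                 pieces.append(small_units[f % 4])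
--             if f != 0 and f % 4 == 0:
--                 pieces.append(big_units[f])
--         raw = ''.join(pieces)
--         # one pass: drop a 零 that directly follows another 零
--         out = ''
--         prev = ''
--         for ch in raw:
--             if ch != '零' or prev != '零':
--                 out += ch
--             prev = ch
--         # after collapsing, at most one trailing 零 is left: drop it (keep one char)
--         if out.endswith('零') and len(out) > 1:
--             out = out[:-1]
--         return out
--
--     if len(s) == 1:
--         return digit(s) + '元'
--     if '.' in s:
--         head, _, tail = s.partition('.')
--         return integer_part(head) + '点' + ''.join(digit(c) for c in tail) + '元'
--     return integer_part(s) + '元'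
-- ===== Notes on version B (the rewrite author's own statement) =====
-- stated objective: simpler
-- what changed: B drops A's reverse-build-then-reverse of the integer part (it walks the digits left-to-right with a countdown place index, emitting digit word, small unit, big unit directly in output order) and replaces A's two fix-up while-loops (repeated '零零'->'零' replace until fixpoint, and a pop-one-char-at-a-time trailing-'零' loop) by a single linear collapse pass plus one conditional drop of the final character.
import Mathlib
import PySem

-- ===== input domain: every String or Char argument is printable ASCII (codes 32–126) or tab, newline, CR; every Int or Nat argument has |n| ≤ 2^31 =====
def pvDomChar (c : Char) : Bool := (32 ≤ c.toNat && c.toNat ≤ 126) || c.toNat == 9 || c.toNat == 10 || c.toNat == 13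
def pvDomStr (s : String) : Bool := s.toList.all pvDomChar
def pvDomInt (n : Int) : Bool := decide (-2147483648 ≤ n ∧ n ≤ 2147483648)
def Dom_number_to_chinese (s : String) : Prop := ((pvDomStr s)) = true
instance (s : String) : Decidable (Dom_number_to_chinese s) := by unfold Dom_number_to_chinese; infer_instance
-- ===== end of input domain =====

-- B replaces A's reverse-build-reverse and the two fix-up while-loops by a single left-to-right
-- pass with a countdown place index, a one-pass collapse of doubled 零 and a single trailing-零 drop
-- (objective: simpler; equal return values on all inputs where A returns, stated by Pre_).


-- ===== PORT A =====
-- termination helpers for A's `while "零零" in re_re: re_re = re_re.replace("零零","零")` loop: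
-- repzz is one replace pass; the port cites replace_zz_length_lt in its decreasing_by.
def repzz : List Char → List Char
  | [] => []
  | [c] => [c]
  | a :: b :: t => if a = '零' ∧ b = '零' then '零' :: repzz t else a :: repzz (b :: t)
termination_by l => l.length

theorem go_eq (fuel : Nat) : ∀ (l acc : List Char), l.length ≤ fuel →
    PySem.Chars.replace.go ['零','零'] ['零'] fuel l acc = acc.reverse ++ repzz l := by
  induction fuel with
  | zero =>
    intro l acc h
    have : l = [] := List.length_eq_zero_iff.mp (Nat.le_zero.mp h)
    subst this; simp [PySem.Chars.replace.go, repzz]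
  | succ n ih =>
    intro l acc h
    match l with
    | [] => simp [PySem.Chars.replace.go, repzz]
    | c :: t =>
      rw [PySem.Chars.replace.go]
      by_cases hp : List.isPrefixOf ['零','零'] (c :: t) = true
      · simp only [hp, if_pos]
        obtain ⟨u, hu⟩ := List.isPrefixOf_iff_prefix.mp hp
        have hc : c = '零' := by
          have := congrArg (·.head?) hu; simpa using this.symm
        obtain ⟨t', ht⟩ : ∃ t', t = '零' :: t' := by
          cases t with
          | nil => simp at hu
          | cons b t' =>
            refine ⟨t', ?_⟩
            have := congrArg (·.tail.head?) hu; simp at this; simp [← this]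
        subst hc ht
        have hn : t'.length ≤ n := by simp at h; omega
        rw [show List.drop (List.length ['零','零']) ('零'::'零'::t') = t' from rfl]
        rw [ih t' _ hn]
        simp [repzz]
      · simp only [hp, Bool.false_eq_true, not_false_iff, if_neg]
        rw [ih t (c :: acc) (by simpa using Nat.le_of_succ_le_succ h)]
        have hr : repzz (c :: t) = c :: repzz t := by
          cases t with
          | nil => simp [repzz]
          | cons b t' =>
            rw [repzz, if_neg]
            intro ⟨h1, h2⟩
            exact hp (by subst h1 h2; simp [List.isPrefixOf])
        rw [hr]; simp

theorem replace_zz (t : List Char) :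
    PySem.Chars.replace t ['零','零'] ['零'] = repzz t := by
  rw [PySem.Chars.replace]
  simp only [List.isEmpty_cons]
  exact go_eq t.length t [] le_rfl

theorem repzz_length_le (t : List Char) : (repzz t).length ≤ t.length := by
  induction t using repzz.induct with
  | case1 => simp [repzz]
  | case2 c => simp [repzz]
  | case3 a b t h ih => rw [repzz, if_pos h]; simpa using by omega
  | case4 a b t h ih => rw [repzz, if_neg h]; simpa using ih

theorem repzz_length_lt (t : List Char) (h : ['零','零'] <:+: t) :
    (repzz t).length < t.length := by
  induction t using repzz.induct with
  | case1 => simp at h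
  | case2 c =>
    exfalso
    have := h.length_le; simp at this
  | case3 a b t hab ih =>
    rw [repzz, if_pos hab]
    have := repzz_length_le t
    simp; omega
  | case4 a b t hab ih =>
    rw [repzz, if_neg hab]
    have hbt : ['零','零'] <:+: b :: t := by
      rcases List.infix_cons_iff.mp h with hpre | hinf
      · exfalso
        obtain ⟨u, hu⟩ := hpre
        apply hab
        constructor
        · have := congrArg (·.head?) hu; simpa using this.symm
        · have := congrArg (·.tail.head?) hu; simpa using this.symm
      · exact hinf
    have h2 := ih hbt
    simp only [List.length_cons] at *
    omega

theorem replace_zz_length_lt (t : List Char)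
    (h : PySem.Chars.isIn ['零','零'] t = true) :
    (PySem.Chars.replace t ['零','零'] ['零']).length < t.length := by
  rw [replace_zz]
  exact repzz_length_lt t ((PySem.Chars.isIn_iff_infix _ _).mp h)

-- s_duizhao / s_danwei (values kept as char lists; strings are built at the end)
def sduizhao : PySem.Dict Char (List Char) :=
  ⟨[('0', ['零']), ('1', ['壹']), ('2', ['贰']), ('3', ['叁']), ('4', ['肆']),
   ('5', ['伍']), ('6', ['陆']), ('7', ['柒']), ('8', ['捌']), ('9', ['玖'])]⟩

def sdanwei : PySem.Dict Nat (List Char) :=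
  ⟨[(0, []), (1, ['拾']), (2, ['佰']), (3, ['仟']), (4, ['万']), (8, ['亿'])]⟩

-- the for-loop body over the reversed digits; state = (re_re, flag_1)
-- (missing dict keys make Python raise KeyError; the port's `getD []` there is excluded by Pre_)
def aStep (st : List Char × Nat) (c : Char) : List Char × Nat :=
  let acc := if st.2 ≠ 0 ∧ st.2 % 4 = 0 then st.1 ++ sdanwei.getD st.2 [] else st.1
  let acc := if c ≠ '0' then acc ++ sdanwei.getD (st.2 % 4) [] else acc
  (acc ++ sduizhao.getD c [], st.2 + 1)

-- while re_re.endswith('零') and len(re_re) > 1: re_re = re_re[:-1]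
def aStrip (t : List Char) : List Char :=
  if PySem.Chars.endswith t ['零'] ∧ t.length > 1 then aStrip t.dropLast else t
termination_by t.length
decreasing_by
  rename_i h
  have := h.2
  simp [List.length_dropLast]; omega

-- while "零零" in re_re: re_re = re_re.replace("零零", "零")
def aCollapse (t : List Char) : List Char :=
  if h : PySem.Chars.isIn ['零','零'] t = true then
    aCollapse (PySem.Chars.replace t ['零','零'] ['零'])
  else t
termination_by t.length
decreasing_by exact replace_zz_length_lt t h

-- the shared build/strip/collapse pipeline of both branches of A (s_1 reversed, folded, reversed back)
def aInt (s1 : List Char) : List Char :=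
  aCollapse (aStrip ((s1.reverse.foldl aStep ([], 0)).1.reverse))

-- if re_re[1] == '十' and re_re[0] == '一': re_re = re_re[1:]
-- (Python raises IndexError when len(re_re) < 2; those inputs are excluded by Pre_)
def aGuard (rr : List Char) : List Char :=
  match PySem.List.pyGet? rr 1, PySem.List.pyGet? rr 0 with
  | some c1, some c0 =>
      if c1 = '十' ∧ c0 = '一' then PySem.List.slice rr (some 1) none else rr
  | _, _ => rr

def number_to_chinese (s : String) : String :=
  let cs := s.toList
  if cs.length = 1 then
    -- s_duizhao[s]: for a length-1 string the key is its single character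
    String.ofList (sduizhao.getD (cs.headD ' ') [] ++ ['元'])
  else
    let rr :=
      if PySem.Chars.isIn ['.'] cs then
        let i := PySem.Chars.find cs ['.']          -- s.find('.')
        let s1 := PySem.List.slice cs (some 0) (some i)
        let s2 := PySem.List.slice cs (some (i + 1)) none
        let r1 := aInt s1 ++ ['点']
        s2.foldl (fun acc c => acc ++ sduizhao.getD c []) r1
      else
        aInt cs
    String.ofList (aGuard rr ++ ['元'])

-- ===== PORT B =====
def bDigits : List (List Char) :=
  [['零'],['壹'],['贰'],['叁'],['肆'],['伍'],['陆'],['柒'],['捌'],['玖']]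
def bSmall : List (List Char) := [[], ['拾'], ['佰'], ['仟']]
def bBig : PySem.Dict Nat (List Char) := ⟨[(4, ['万']), (8, ['亿'])]⟩

-- digit_words[int(c)]  (int(c) raises ValueError on a non-digit — excluded by Pre_)
def bDigit (c : Char) : List Char :=
  match PySem.Int.ofStr? (String.ofList [c]) with
  | some n => PySem.List.pyGetD bDigits n ['?']
  | none => ['?']

-- loop body of integer_part; state = (pieces, f); f counts down from len(part)
def bStep (st : List (List Char) × Nat) (c : Char) : List (List Char) × Nat :=
  let f := st.2 - 1
  let ps := st.1 ++ [bDigit c]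
  let ps := if c ≠ '0' then ps ++ [PySem.List.pyGetD bSmall ((f : Int) % 4) []] else ps
  let ps := if f ≠ 0 ∧ f % 4 = 0 then ps ++ [bBig.getD f []] else ps
  (ps, f)

-- the collapse loop; state = (out, prev) with prev a string of length ≤ 1 (as in the Python)
def bCollapseStep (st : List Char × List Char) (c : Char) : List Char × List Char :=
  (if c ≠ '零' ∨ st.2 ≠ ['零'] then st.1 ++ [c] else st.1, [c])

def bIntPart (part : List Char) : List Char :=
  let raw := PySem.Chars.join [] (part.foldl bStep ([], part.length)).1
  let out := (raw.foldl bCollapseStep ([], [])).1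
  if PySem.Chars.endswith out ['零'] ∧ out.length > 1 then
    PySem.List.slice out none (some (-1))
  else out

def number_to_chinese_alt (s : String) : String :=
  let cs := s.toList
  if cs.length = 1 then String.ofList (bDigit (cs.headD ' ') ++ ['元'])
  else if PySem.Chars.isIn ['.'] cs then
    -- str.partition('.') ported by hand: split at the first occurrence (exact: '.' is present here)
    let i := (PySem.Chars.find cs ['.']).toNat
    let head := cs.take i
    let tail := cs.drop (i + 1)
    String.ofList (bIntPart head ++ ['点'] ++ PySem.Chars.join [] (tail.map bDigit) ++ ['元'])
  else String.ofList (bIntPart cs ++ ['元'])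

-- ===== PRECONDITION & SPEC =====
def digitChars : List Char := ['0','1','2','3','4','5','6','7','8','9']

-- Pre_ is exactly where Python A returns normally. Excluded (A raises there): any non-digit
-- character in either part, including a duplicated decimal dot (KeyError); an integer part of
-- 13 or more digits (KeyError); and the empty or all-zero dotless strings, whose one-character
-- result makes A's dead guard index out of range (IndexError).
def Pre_number_to_chinese (s : String) : Prop :=
  let cs := s.toList
  if cs.length = 1 then cs.all digitChars.contains = true
  else if '.' ∈ cs then
    (cs.take (cs.idxOf '.')).all digitChars.contains = true ∧ cs.idxOf '.' ≤ 12 ∧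
    (cs.drop (cs.idxOf '.' + 1)).all digitChars.contains = true
  else cs ≠ [] ∧ cs.all digitChars.contains = true ∧ cs.length ≤ 12 ∧
    cs.any (· != '0') = true

instance (s : String) : Decidable (Pre_number_to_chinese s) := by
  unfold Pre_number_to_chinese; infer_instance

def pvWitness_number_to_chinese : String := "105.8"

def Spec_number_to_chinese (s : String) (out : String) : Prop := out = number_to_chinese_alt s
instance (s : String) (out : String) : Decidable (Spec_number_to_chinese s out) := by
  unfold Spec_number_to_chinese; infer_instance

-- ===== CLAIM (what is proved, stated in full; the proofs are below) =====
def Claim_equal_number_to_chinese : Prop :=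
  ∀ (s : String), Dom_number_to_chinese s → Pre_number_to_chinese s →
    Spec_number_to_chinese s (number_to_chinese s)

-- ===== LEMMAS AND PROOFS =====

theorem all_digits_iff (l : List Char) :
    l.all digitChars.contains = true ↔ ∀ c ∈ l, c ∈ digitChars := by
  simp [List.all_eq_true]

-- collapse: one-pass dedup spec
def ded : Option Char → List Char → List Char
  | _, [] => []
  | p, c :: t => if c = '零' ∧ p = some '零' then ded (some c) t else c :: ded (some c) t

theorem foldCollapse (t : List Char) : ∀ (acc : List Char) (p : List Char), p.length ≤ 1 →
    (t.foldl bCollapseStep (acc, p)).1 = acc ++ ded p.head? t := by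
  induction t with
  | nil => intro acc p _; simp [ded]
  | cons c t ih =>
    intro acc p hp
    by_cases h : c = '零' ∧ p.head? = some '零'
    · have hpz : p = ['零'] := by
        match p, hp with
        | [], _ => simp at h
        | [x], _ => simp at h; simp [h.2]
      subst hpz
      simp only [List.foldl_cons, bCollapseStep, h.1]
      rw [if_neg (by simp), ih acc ['零'] (by simp)]
      simp [ded]
    · have hne : c ≠ '零' ∨ p ≠ ['零'] := by
        rcases not_and_or.mp h with h1 | h1
        · exact Or.inl h1
        · right; intro hc; subst hc; simp at h1
      simp only [List.foldl_cons, bCollapseStep]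
      rw [if_pos (by simpa using hne), ih (acc ++ [c]) [c] (by simp)]
      rw [ded, if_neg (by simpa using h)]
      simp

theorem ded_repzz (t : List Char) : ∀ p, ded p (repzz t) = ded p t := by
  induction t using repzz.induct with
  | case1 => intro p; simp [repzz]
  | case2 c => intro p; simp [repzz]
  | case3 a b t hab ih =>
    intro p
    obtain ⟨ha, hb⟩ := hab
    subst ha hb
    rw [repzz, if_pos ⟨rfl, rfl⟩]
    by_cases hp : p = some '零'
    · rw [ded, if_pos ⟨rfl, hp⟩, ih, ded, if_pos ⟨rfl, hp⟩, ded, if_pos ⟨rfl, rfl⟩]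
    · rw [ded, if_neg (by simp [hp]), ih, ded, if_neg (by simp [hp]), ded, if_pos ⟨rfl, rfl⟩]
  | case4 a b t hab ih =>
    intro p
    rw [repzz, if_neg hab]
    by_cases hc : a = '零' ∧ p = some '零'
    · rw [ded, if_pos hc, ih (some a)]
      conv_rhs => rw [ded, if_pos hc]
    · rw [ded, if_neg hc, ih (some a)]
      conv_rhs => rw [ded, if_neg hc]

theorem ded_eq_self (t : List Char) : ∀ p, ¬ (['零','零'] <:+: t) →
    (p = some '零' → t.head? ≠ some '零') → ded p t = t := by
  induction t with
  | nil => intro p _ _; simp [ded]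
  | cons c t ih =>
    intro p hinf hhd
    have hc : ¬ (c = '零' ∧ p = some '零') := by
      rintro ⟨h1, h2⟩
      exact hhd h2 (by simp [h1])
    rw [ded, if_neg hc, ih (some c)]
    · intro h; exact hinf ((List.infix_cons_iff).mpr (Or.inr h))
    · intro hcz hth
      apply hinf
      apply List.infix_cons_iff.mpr
      left
      cases t with
      | nil => simp at hth
      | cons b t' =>
        simp at hth
        refine ⟨t', ?_⟩
        simp at hcz
        simp [hcz, hth]

theorem collapse_eq_ded (t : List Char) : aCollapse t = ded none t := by
  induction t using aCollapse.induct with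
  | case1 t h ih =>
    rw [aCollapse, dif_pos h, ih, replace_zz, ded_repzz]
  | case2 t h =>
    rw [aCollapse, dif_neg h]
    refine (ded_eq_self t none ?_ (by simp)).symm
    intro hinf
    exact h ((PySem.Chars.isIn_iff_infix _ _).mpr hinf)

theorem getLast?_cons_or (a : Char) (u : List Char) (p : Option Char) :
    ((a :: u).getLast?).or p = (u.getLast?).or (some a) := by
  cases u with
  | nil => simp
  | cons b u' =>
    obtain ⟨x, hx⟩ := Option.isSome_iff_exists.mp (List.getLast?_isSome.mpr (by simp) :
      (b :: u').getLast?.isSome)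
    simp [List.getLast?_cons_cons, hx]

theorem ded_append (u : List Char) : ∀ (p : Option Char) (c : Char), ded p (u ++ [c]) =
    if c = '零' ∧ (u.getLast?).or p = some '零' then ded p u else ded p u ++ [c] := by
  induction u with
  | nil =>
    intro p c
    simp only [List.nil_append, List.getLast?_nil, Option.none_or, ded]
  | cons a u' ih =>
    intro p c
    rw [getLast?_cons_or]
    by_cases ha : a = '零' ∧ p = some '零'
    · rw [show (a :: u') ++ [c] = a :: (u' ++ [c]) from rfl, ded, if_pos ha, ih (some a) c]
      by_cases hc : c = '零' ∧ (u'.getLast?).or (some a) = some '零'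
      · rw [if_pos hc, if_pos hc]
        conv_rhs => rw [ded, if_pos ha]
      · rw [if_neg hc, if_neg hc]
        conv_rhs => rw [ded, if_pos ha]
    · rw [show (a :: u') ++ [c] = a :: (u' ++ [c]) from rfl, ded, if_neg ha, ih (some a) c]
      by_cases hc : c = '零' ∧ (u'.getLast?).or (some a) = some '零'
      · rw [if_pos hc, if_pos hc]
        conv_rhs => rw [ded, if_neg ha]
      · rw [if_neg hc, if_neg hc]
        conv_rhs => rw [ded, if_neg ha]
        simp

theorem ded_none_ne_nil (t : List Char) (h : t ≠ []) : ded none t ≠ [] := by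
  cases t with
  | nil => exact absurd rfl h
  | cons c t' => rw [ded, if_neg (by simp)]; simp

def dropOneZ (t : List Char) : List Char :=
  if t.getLast? = some '零' ∧ 1 < t.length then t.dropLast else t

theorem endswith_z_iff (t : List Char) :
    PySem.Chars.endswith t ['零'] = true ↔ t.getLast? = some '零' := by
  rw [PySem.Chars.endswith, List.isSuffixOf_iff_suffix]
  constructor
  · rintro ⟨u, hu⟩
    rw [← hu]; simp
  · intro h
    obtain ⟨u, hu⟩ := List.getLast?_eq_some_iff.mp h
    exact ⟨u, hu.symm⟩

theorem ded_none_getLast (u : List Char) (c : Char) (hc : c ≠ '零') :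
    (ded none (u ++ [c])).getLast? = some c := by
  rw [ded_append, if_neg (by simp [hc])]
  simp

theorem strip_ded (t : List Char) : ded none (aStrip t) = dropOneZ (ded none t) := by
  induction t using aStrip.induct with
  | case1 t h ih =>
    obtain ⟨hend, hlen⟩ := h
    obtain ⟨u, hu⟩ : ∃ u, t = u ++ ['零'] := by
      obtain ⟨v, hv⟩ := List.getLast?_eq_some_iff.mp ((endswith_z_iff t).mp hend)
      exact ⟨v, hv⟩
    rw [aStrip, if_pos ⟨hend, hlen⟩, ih]
    have hdl : t.dropLast = u := by rw [hu]; simp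
    have hune : u ≠ [] := by
      rintro rfl; rw [hu] at hlen; simp at hlen
    rw [hdl, hu, ded_append, Option.or_none]
    by_cases hz : u.getLast? = some '零'
    · rw [if_pos ⟨rfl, hz⟩]
    · rw [if_neg (by simp [hz])]
      have hne : ded none u ≠ [] := ded_none_ne_nil u hune
      have hR : dropOneZ (ded none u ++ ['零']) = ded none u := by
        rw [dropOneZ,
          if_pos ⟨by simp, by
            rw [List.length_append]
            have := List.length_pos_iff.mpr hne
            simp; omega⟩,
          List.dropLast_concat]
      rw [hR]
      cases hgu : u.getLast? with
      | none => exact absurd (List.getLast?_eq_none_iff.mp hgu) hune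
      | some c =>
        have hc : c ≠ '零' := fun h => hz (by rw [hgu, h])
        obtain ⟨v, hv⟩ := List.getLast?_eq_some_iff.mp hgu
        rw [dropOneZ, if_neg]
        rw [hv, ded_none_getLast v c hc]
        simp [hc]
  | case2 t h =>
    rw [aStrip, if_neg h]
    rcases Decidable.not_and_iff_not_or_not.mp h with h1 | h1
    · -- t does not end with 零
      cases ht : t.getLast? with
      | none =>
        have : t = [] := List.getLast?_eq_none_iff.mp ht
        subst this; simp [ded, dropOneZ]
      | some c =>
        have hc : c ≠ '零' := by
          intro hc; subst hc; exact h1 ((endswith_z_iff t).mpr ht)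
        obtain ⟨u, hu⟩ := List.getLast?_eq_some_iff.mp ht
        rw [hu, dropOneZ, if_neg (by rw [ded_none_getLast u c hc]; simp [hc])]
    · -- len(t) ≤ 1
      have hlen : t.length ≤ 1 := by omega
      match t, hlen with
      | [], _ => simp [ded, dropOneZ]
      | [c], _ =>
        rw [show ded none [c] = [c] from by rw [ded, if_neg (by simp)]; simp [ded]]
        rw [dropOneZ, if_neg (by simp)]

-- build: A's reversed fold vs B's forward fold
def gA (f : Nat) (c : Char) : List Char :=
  (if f ≠ 0 ∧ f % 4 = 0 then sdanwei.getD f [] else []) ++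
  (if c ≠ '0' then sdanwei.getD (f % 4) [] else []) ++ sduizhao.getD c []

def specA : Nat → List Char → List Char
  | _, [] => []
  | f, c :: t => gA f c ++ specA (f + 1) t

theorem foldA (r : List Char) : ∀ (acc : List Char) (f : Nat),
    (r.foldl aStep (acc, f)).1 = acc ++ specA f r := by
  induction r with
  | nil => intro acc f; simp [specA]
  | cons c t ih =>
    intro acc f
    have hstep : aStep (acc, f) c =
        (acc ++ gA f c, f + 1) := by
      simp only [aStep, gA]
      split_ifs <;> simp
    rw [List.foldl_cons, hstep, ih, specA]
    simp

def gB (f : Nat) (c : Char) : List (List Char) :=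
  [bDigit c] ++ (if c ≠ '0' then [PySem.List.pyGetD bSmall ((f : Int) % 4) []] else []) ++
  (if f ≠ 0 ∧ f % 4 = 0 then [bBig.getD f []] else [])

def specB : List Char → Nat → List (List Char)
  | [], _ => []
  | c :: t, n => gB (t.length + n) c ++ specB t n

theorem foldB (u : List Char) : ∀ (ps : List (List Char)) (n : Nat),
    (u.foldl bStep (ps, u.length + n)).1 = ps ++ specB u n := by
  induction u with
  | nil => intro ps n; simp [specB]
  | cons c t ih =>
    intro ps n
    have hstep : bStep (ps, (c :: t).length + n) c = (ps ++ gB (t.length + n) c, t.length + n) := by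
      simp only [bStep, gB, List.length_cons]
      have hf : t.length + 1 + n - 1 = t.length + n := by omega
      rw [hf]
      split_ifs <;> simp
    rw [List.foldl_cons, hstep, ih, specB]
    simp

theorem specB_concat (u : List Char) : ∀ (c : Char) (n : Nat),
    specB (u ++ [c]) n = specB u (n + 1) ++ gB n c := by
  induction u with
  | nil => intro c n; simp [specB]
  | cons d t ih =>
    intro c n
    rw [show (d :: t) ++ [c] = d :: (t ++ [c]) from rfl, specB, ih, specB]
    have : (t ++ [c]).length + n = t.length + (n + 1) := by simp; omega
    rw [this]
    simp

-- per-character piece equalities (A dict lookups vs B indexings)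
theorem digit_piece (c : Char) (hc : c ∈ digitChars) :
    sduizhao.getD c [] = bDigit c := by
  fin_cases hc <;> rfl

theorem small_piece (f : Nat) :
    sdanwei.getD (f % 4) [] = PySem.List.pyGetD bSmall ((f : Int) % 4) [] := by
  have h4 : f % 4 = 0 ∨ f % 4 = 1 ∨ f % 4 = 2 ∨ f % 4 = 3 := by omega
  have hcast : (f : Int) % 4 = ((f % 4 : Nat) : Int) := by omega
  rcases h4 with h | h | h | h <;> rw [hcast, h] <;> rfl

theorem big_piece (f : Nat) (h0 : f ≠ 0) (h4 : f % 4 = 0) :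
    sdanwei.getD f [] = bBig.getD f [] := by
  have : f = 4 ∨ f = 8 ∨ 12 ≤ f := by omega
  rcases this with h | h | h
  · subst h; rfl
  · subst h; rfl
  · have k0 : ¬ ((0 : Nat) == f) = true := by simp; omega
    have k1 : ¬ ((1 : Nat) == f) = true := by simp; omega
    have k2 : ¬ ((2 : Nat) == f) = true := by simp; omega
    have k3 : ¬ ((3 : Nat) == f) = true := by simp; omega
    have k4 : ¬ ((4 : Nat) == f) = true := by simp; omega
    have k8 : ¬ ((8 : Nat) == f) = true := by simp; omega
    simp [sdanwei, bBig, PySem.Dict.getD, PySem.Dict.get?, List.find?, k0, k1, k2, k3, k4, k8]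

theorem gA_rev (f : Nat) (c : Char) (hc : c ∈ digitChars) :
    (gA f c).reverse = (gB f c).flatten := by
  rw [gA, gB, digit_piece c hc, small_piece f]
  have hd : ∃ w, bDigit c = [w] := by fin_cases hc <;> exact ⟨_, rfl⟩
  obtain ⟨w, hw⟩ := hd
  have hs : ∃ l, PySem.List.pyGetD bSmall ((f : Int) % 4) [] = l ∧ l.length ≤ 1 := by
    refine ⟨_, rfl, ?_⟩
    rw [← small_piece f]
    have h4 : f % 4 = 0 ∨ f % 4 = 1 ∨ f % 4 = 2 ∨ f % 4 = 3 := by omega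
    rcases h4 with h | h | h | h <;> rw [h] <;> decide
  have hb : (sdanwei.getD f []).length ≤ 1 ∧
      (f ≠ 0 ∧ f % 4 = 0 → sdanwei.getD f [] = bBig.getD f []) := by
    constructor
    · have : f = 0 ∨ f = 1 ∨ f = 2 ∨ f = 3 ∨ f = 4 ∨ f = 8 ∨
          (f ≠ 0 ∧ f ≠ 1 ∧ f ≠ 2 ∧ f ≠ 3 ∧ f ≠ 4 ∧ f ≠ 8) := by omega
      rcases this with h | h | h | h | h | h | h
      · subst h; decide
      · subst h; decide
      · subst h; decide
      · subst h; decide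
      · subst h; decide
      · subst h; decide
      · obtain ⟨n0, n1, n2, n3, n4, n8⟩ := h
        have k0 : ¬ ((0 : Nat) == f) = true := by simp; omega
        have k1 : ¬ ((1 : Nat) == f) = true := by simp; omega
        have k2 : ¬ ((2 : Nat) == f) = true := by simp; omega
        have k3 : ¬ ((3 : Nat) == f) = true := by simp; omega
        have k4 : ¬ ((4 : Nat) == f) = true := by simp; omega
        have k8 : ¬ ((8 : Nat) == f) = true := by simp; omega
        simp [sdanwei, PySem.Dict.getD, PySem.Dict.get?, List.find?, k0, k1, k2, k3, k4, k8]
    · intro ⟨h0, h4⟩; exact big_piece f h0 h4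
  obtain ⟨l, hl, hllen⟩ := hs
  rw [hl, hw]
  by_cases hP : f ≠ 0 ∧ f % 4 = 0
  · rw [if_pos hP, if_pos hP, ← hb.2 hP]
    have hblen := hb.1
    by_cases hq : c ≠ '0'
    · rw [if_pos hq, if_pos hq]
      rw [List.reverse_append, List.reverse_append]
      match sdanwei.getD f [], hblen, l, hllen with
      | [], _, [], _ => simp
      | [], _, [x], _ => simp
      | [y], _, [], _ => simp
      | [y], _, [x], _ => simp
    · rw [if_neg hq, if_neg hq]
      match sdanwei.getD f [], hblen with
      | [], _ => simp
      | [y], _ => simp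
  · rw [if_neg hP, if_neg hP]
    by_cases hq : c ≠ '0'
    · rw [if_pos hq, if_pos hq]
      match l, hllen with
      | [], _ => simp
      | [x], _ => simp
    · rw [if_neg hq, if_neg hq]; simp

theorem specA_rev (u : List Char) (hu : ∀ c ∈ u, c ∈ digitChars) : ∀ (f : Nat),
    (specA f u.reverse).reverse = (specB u f).flatten := by
  induction u using List.reverseRecOn with
  | nil => intro f; simp [specA, specB]
  | append_singleton u' c ih =>
    intro f
    have hu' : ∀ x ∈ u', x ∈ digitChars := fun x hx => hu x (by simp [hx])
    have hc : c ∈ digitChars := hu c (by simp)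
    rw [List.reverse_append, List.reverse_singleton, List.singleton_append, specA,
      List.reverse_append, ih hu' (f + 1), gA_rev f c hc, specB_concat, List.flatten_append]

theorem join_flatten (ps : List (List Char)) : PySem.Chars.join [] ps = ps.flatten := by
  induction ps with
  | nil => rfl
  | cons p ps ih =>
    cases ps with
    | nil => simp [PySem.Chars.join, List.intercalate]
    | cons q ps' => rw [PySem.Chars.join_cons_cons]; simp_all

-- the two fix-up passes and B's pipeline as one normal form
theorem bIntPart_eq (u : List Char) :
    bIntPart u = dropOneZ (ded none (specB u 0).flatten) := by
  have hraw : PySem.Chars.join [] (u.foldl bStep ([], u.length)).1 = (specB u 0).flatten := by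
    have h := foldB u [] 0
    rw [Nat.add_zero] at h
    rw [h, List.nil_append, join_flatten]
  have hout : ((specB u 0).flatten.foldl bCollapseStep ([], [])).1 =
      ded none (specB u 0).flatten := by
    simpa using foldCollapse (specB u 0).flatten [] [] (by simp)
  rw [bIntPart, hraw, hout, dropOneZ, PySem.List.slice_to_neg_one]
  by_cases h : (ded none (specB u 0).flatten).getLast? = some '零' ∧
      1 < (ded none (specB u 0).flatten).length
  · rw [if_pos ⟨(endswith_z_iff _).mpr h.1, h.2⟩, if_pos h]
  · rw [if_neg, if_neg h]
    intro ⟨h1, h2⟩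
    exact h ⟨(endswith_z_iff _).mp h1, h2⟩

theorem aInt_eq (u : List Char) (hu : ∀ c ∈ u, c ∈ digitChars) :
    aInt u = dropOneZ (ded none (specB u 0).flatten) := by
  have hraw : (u.reverse.foldl aStep ([], 0)).1.reverse = (specB u 0).flatten := by
    rw [foldA, List.nil_append, specA_rev u hu 0]
  rw [aInt, hraw, collapse_eq_ded, strip_ded]

theorem main_pipeline (u : List Char) (hu : ∀ c ∈ u, c ∈ digitChars) :
    aInt u = bIntPart u := by
  rw [aInt_eq u hu, bIntPart_eq]

-- every character either program ever emits
def okChars : List Char :=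
  ['零','壹','贰','叁','肆','伍','陆','柒','捌','玖','拾','佰','仟','万','亿','点']

theorem mem_bDigit (c : Char) (hc : c ∈ digitChars) : ∀ x ∈ bDigit c, x ∈ okChars := by
  fin_cases hc <;>
    first
      | (rw [show bDigit '0' = ['零'] from rfl]; simp [okChars])
      | (rw [show bDigit '1' = ['壹'] from rfl]; simp [okChars])
      | (rw [show bDigit '2' = ['贰'] from rfl]; simp [okChars])
      | (rw [show bDigit '3' = ['叁'] from rfl]; simp [okChars])
      | (rw [show bDigit '4' = ['肆'] from rfl]; simp [okChars])
      | (rw [show bDigit '5' = ['伍'] from rfl]; simp [okChars])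
      | (rw [show bDigit '6' = ['陆'] from rfl]; simp [okChars])
      | (rw [show bDigit '7' = ['柒'] from rfl]; simp [okChars])
      | (rw [show bDigit '8' = ['捌'] from rfl]; simp [okChars])
      | (rw [show bDigit '9' = ['玖'] from rfl]; simp [okChars])

theorem mem_bSmall (F : Nat) : ∀ x ∈ PySem.List.pyGetD bSmall ((F : Int) % 4) [], x ∈ okChars := by
  have hcast : (F : Int) % 4 = ((F % 4 : Nat) : Int) := by omega
  have h4 : F % 4 = 0 ∨ F % 4 = 1 ∨ F % 4 = 2 ∨ F % 4 = 3 := by omega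
  rw [hcast]
  rcases h4 with h | h | h | h <;> rw [h] <;>
    first
      | (rw [show PySem.List.pyGetD bSmall ((0 : Nat) : Int) [] = [] from rfl]; simp)
      | (rw [show PySem.List.pyGetD bSmall ((1 : Nat) : Int) [] = ['拾'] from rfl]; simp [okChars])
      | (rw [show PySem.List.pyGetD bSmall ((2 : Nat) : Int) [] = ['佰'] from rfl]; simp [okChars])
      | (rw [show PySem.List.pyGetD bSmall ((3 : Nat) : Int) [] = ['仟'] from rfl]; simp [okChars])

theorem mem_bBig (F : Nat) : ∀ x ∈ bBig.getD F [], x ∈ okChars := by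
  by_cases h4 : F = 4
  · subst h4; rw [show bBig.getD 4 [] = ['万'] from rfl]; simp [okChars]
  by_cases h8 : F = 8
  · subst h8; rw [show bBig.getD 8 [] = ['亿'] from rfl]; simp [okChars]
  have k4 : ¬ ((4 : Nat) == F) = true := by simp; omega
  have k8 : ¬ ((8 : Nat) == F) = true := by simp; omega
  intro x hx
  simp [bBig, PySem.Dict.getD, PySem.Dict.get?, List.find?, k4, k8] at hx

theorem mem_flatten_specB (u : List Char) : ∀ (n : Nat) (x : Char),
    (∀ c ∈ u, c ∈ digitChars) → x ∈ (specB u n).flatten → x ∈ okChars := by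
  induction u with
  | nil => intro n x _ hx; simp [specB] at hx
  | cons c t ih =>
    intro n x hu hx
    rw [specB, List.flatten_append] at hx
    rcases List.mem_append.mp hx with hx | hx
    · rw [gB] at hx
      obtain ⟨w, hw, hxw⟩ := List.mem_flatten.mp hx
      rcases List.mem_append.mp hw with hw | hw
      · rcases List.mem_append.mp hw with hw | hw
        · rw [List.mem_singleton] at hw
          subst hw
          exact mem_bDigit c (hu c (by simp)) x hxw
        · split at hw
          · rw [List.mem_singleton] at hw
            subst hw
            exact mem_bSmall _ x hxw
          · simp at hw
      · split at hw
        · rw [List.mem_singleton] at hw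
          subst hw
          exact mem_bBig _ x hxw
        · simp at hw
    · exact ih n x (fun d hd => hu d (by simp [hd])) hx

theorem mem_ded (t : List Char) : ∀ (p : Option Char) (x : Char), x ∈ ded p t → x ∈ t := by
  induction t with
  | nil => intro p x hx; simp [ded] at hx
  | cons c t ih =>
    intro p x hx
    rw [ded] at hx
    split at hx
    · exact List.mem_cons_of_mem c (ih (some c) x hx)
    · rcases List.mem_cons.mp hx with h | h
      · simp [h]
      · exact List.mem_cons_of_mem c (ih (some c) x h)

theorem mem_dropOneZ (t : List Char) (x : Char) (hx : x ∈ dropOneZ t) : x ∈ t := by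
  rw [dropOneZ] at hx
  split at hx
  · exact (List.dropLast_sublist t).mem hx
  · exact hx

theorem mem_bIntPart (u : List Char) (hu : ∀ c ∈ u, c ∈ digitChars) (x : Char)
    (hx : x ∈ bIntPart u) : x ∈ okChars := by
  rw [bIntPart_eq] at hx
  exact mem_flatten_specB u 0 x hu (mem_ded _ _ _ (mem_dropOneZ _ _ hx))

theorem guard_ok (rr : List Char) (h : ∀ c ∈ rr, c ∈ okChars) :
    aGuard rr = rr := by
  have hok : ∀ x ∈ okChars, x ≠ '十' := by simp [okChars]
  rw [aGuard]
  cases h1 : PySem.List.pyGet? rr 1 with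
  | none => rfl
  | some c1 =>
    cases h0 : PySem.List.pyGet? rr 0 with
    | none => rfl
    | some c0 =>
      have hmem : c1 ∈ rr := by
        rw [show (1 : Int) = ((1 : Nat) : Int) from rfl, PySem.List.pyGet?_natCast] at h1
        exact List.mem_of_getElem? h1
      have hred : (if c1 = '十' ∧ c0 = '一' then PySem.List.slice rr (some 1) none else rr)
          = rr := by
        rw [if_neg]
        intro ⟨hc1, _⟩
        exact hok c1 (h c1 hmem) hc1
      exact hred

-- s.find('.') is the first index of '.'
theorem singleton_prefix_iff (a : Char) (l : List Char) : [a] <+: l ↔ l.head? = some a := by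
  constructor
  · rintro ⟨t, ht⟩; rw [← ht]; rfl
  · intro h
    cases l with
    | nil => simp at h
    | cons b t => simp at h; exact ⟨t, by simp [h]⟩

theorem infix_singleton_mem (a : Char) (l : List Char) : [a] <:+: l ↔ a ∈ l := by
  constructor
  · intro h; simpa using h.sublist.subset (by simp)
  · intro h
    obtain ⟨s, t, hst⟩ := List.append_of_mem h
    exact ⟨s, t, by rw [hst]; simp⟩

theorem idxOf_spec (a : Char) (l : List Char) : ∀ (k : Nat), l[k]? = some a →
    (∀ i < k, l[i]? ≠ some a) → l.idxOf a = k := by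
  induction l with
  | nil => intro k hk _; simp at hk
  | cons c t ih =>
    intro k hk hmin
    by_cases hca : c = a
    · have hk0 : k = 0 := by
        by_contra h0
        exact hmin 0 (by omega) (by simp [hca])
      rw [hk0, List.idxOf_cons, hca]
      simp
    · have hk0 : k ≠ 0 := by
        intro h0; rw [h0] at hk; simp at hk; exact hca hk
      obtain ⟨k', rfl⟩ : ∃ k', k = k' + 1 := ⟨k - 1, by omega⟩
      rw [List.idxOf_cons, show (c == a) = false from by simp [hca]]
      simp only [cond_false]
      rw [ih k' (by simpa using hk) (fun i hi => by simpa using hmin (i + 1) (by omega))]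

theorem find_dot (cs : List Char) (h : '.' ∈ cs) :
    PySem.Chars.find cs ['.'] = (cs.idxOf '.' : Int) := by
  have hnn : 0 ≤ PySem.Chars.find cs ['.'] :=
    (PySem.Chars.find_nonneg_iff _ _).mpr ((infix_singleton_mem _ _).mpr h)
  obtain ⟨hpre, hmin⟩ := PySem.Chars.find_spec hnn
  have hk : cs[(PySem.Chars.find cs ['.']).toNat]? = some '.' := by
    rw [← List.head?_drop]
    exact (singleton_prefix_iff _ _).mp hpre
  have hmin' : ∀ i < (PySem.Chars.find cs ['.']).toNat, cs[i]? ≠ some '.' := by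
    intro i hi hcontra
    exact hmin i hi ((singleton_prefix_iff _ _).mpr (by rw [List.head?_drop]; exact hcontra))
  rw [idxOf_spec '.' cs _ hk hmin']
  omega

theorem isIn_dot (cs : List Char) : PySem.Chars.isIn ['.'] cs = true ↔ '.' ∈ cs := by
  rw [PySem.Chars.isIn_iff_infix, infix_singleton_mem]

theorem fold_digits (l : List Char) : ∀ (acc : List Char),
    l.foldl (fun acc c => acc ++ sduizhao.getD c []) acc =
      acc ++ (l.map (fun c => sduizhao.getD c [])).flatten := by
  induction l with
  | nil => intro acc; simp
  | cons c t ih => intro acc; rw [List.foldl_cons, ih]; simp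

theorem mem_tail_words (l : List Char) (hl : ∀ c ∈ l, c ∈ digitChars) (x : Char)
    (hx : x ∈ (l.map bDigit).flatten) : x ∈ okChars := by
  obtain ⟨w, hw, hxw⟩ := List.mem_flatten.mp hx
  obtain ⟨c, hc, rfl⟩ := List.mem_map.mp hw
  exact mem_bDigit c (hl c hc) x hxw

-- ===== VERDICT (by name: the statement is the Claim_ definition above) =====
theorem number_to_chinese_spec : Claim_equal_number_to_chinese := by
  intro s _ hpre
  unfold Spec_number_to_chinese
  unfold Pre_number_to_chinese at hpre
  simp only [number_to_chinese, number_to_chinese_alt]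
  by_cases h1 : s.toList.length = 1
  · rw [if_pos h1, if_pos h1]
    rw [if_pos h1, all_digits_iff] at hpre
    obtain ⟨c, hc⟩ := List.length_eq_one_iff.mp h1
    rw [hc]
    simp only [List.headD_cons]
    rw [digit_piece c (by rw [hc] at hpre; exact hpre c (by simp))]
  · rw [if_neg h1, if_neg h1]
    rw [if_neg h1] at hpre
    by_cases hdot : '.' ∈ s.toList
    · have hin : PySem.Chars.isIn ['.'] s.toList = true := (isIn_dot _).mpr hdot
      rw [if_pos hin, if_pos hin]
      rw [if_pos hdot] at hpre
      obtain ⟨hd1, _, hd3⟩ := hpre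
      rw [all_digits_iff] at hd1 hd3
      have hfind := find_dot s.toList hdot
      have hs1 : PySem.List.slice s.toList (some 0) (some (PySem.Chars.find s.toList ['.'])) =
          s.toList.take (s.toList.idxOf '.') := by
        rw [hfind, PySem.List.slice_zero_start, PySem.List.slice_to_natCast]
      have hs2 : PySem.List.slice s.toList (some (PySem.Chars.find s.toList ['.'] + 1)) none =
          s.toList.drop (s.toList.idxOf '.' + 1) := by
        rw [hfind, show (s.toList.idxOf '.' : Int) + 1 = ((s.toList.idxOf '.' + 1 : Nat) : Int)
          from by push_cast; ring, PySem.List.slice_from_natCast]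
      have htoNat : (PySem.Chars.find s.toList ['.']).toNat = s.toList.idxOf '.' := by
        rw [hfind]; exact Int.toNat_natCast _
      rw [hs1, hs2, htoNat, fold_digits]
      have hmap : (s.toList.drop (s.toList.idxOf '.' + 1)).map (fun c => sduizhao.getD c []) =
          (s.toList.drop (s.toList.idxOf '.' + 1)).map bDigit :=
        List.map_congr_left (fun c hc => digit_piece c (hd3 c hc))
      rw [hmap, main_pipeline _ hd1, join_flatten]
      have hguard : aGuard (bIntPart (s.toList.take (s.toList.idxOf '.')) ++ ['点'] ++
          ((s.toList.drop (s.toList.idxOf '.' + 1)).map bDigit).flatten) =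
          bIntPart (s.toList.take (s.toList.idxOf '.')) ++ ['点'] ++
          ((s.toList.drop (s.toList.idxOf '.' + 1)).map bDigit).flatten := by
        apply guard_ok
        intro x hx
        rcases List.mem_append.mp hx with hx | hx
        · rcases List.mem_append.mp hx with hx | hx
          · exact mem_bIntPart _ hd1 x hx
          · simp at hx; simp [hx, okChars]
        · exact mem_tail_words _ hd3 x hx
      rw [hguard]
    · have hin : ¬ PySem.Chars.isIn ['.'] s.toList = true := fun h => hdot ((isIn_dot _).mp h)
      rw [if_neg hin, if_neg hin]
      rw [if_neg hdot] at hpre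
      obtain ⟨_, hdig, _, _⟩ := hpre
      rw [all_digits_iff] at hdig
      rw [main_pipeline _ hdig, guard_ok _ (fun x hx => mem_bIntPart _ hdig x hx)]
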